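-- pv_equiv track=rewrite | github.com/natbrood/scripts-and-such | python/2. Python challenges/2.1 Python principles/6. Double letters.py | double_letters
-- ===== SOURCE A (Python) =====
-- def double_letters(string):
--     previous = ""
--     for x in string:
--         if x == previous:
--             return True
--             break
--         else:
--             previous = x
--     return False
-- ===== SOURCE B (Python) =====
-- def double_letters(string):
--     # A double letter exists iff some character's doubled two-char substring
--     # c+c occurs in the string; test that for each distinct character.
--     return any(c + c in string for c in set(string))
-- ===== Notes on version B (the rewrite author's own statement) =====
-- stated objective: alternative
-- what changed: Replaces the single left-to-right scan carrying the previous character with a substring-search algorithm: build the set of distinct characters and return whether any doubled substring c+c occurs in the string.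
import Mathlib
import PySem

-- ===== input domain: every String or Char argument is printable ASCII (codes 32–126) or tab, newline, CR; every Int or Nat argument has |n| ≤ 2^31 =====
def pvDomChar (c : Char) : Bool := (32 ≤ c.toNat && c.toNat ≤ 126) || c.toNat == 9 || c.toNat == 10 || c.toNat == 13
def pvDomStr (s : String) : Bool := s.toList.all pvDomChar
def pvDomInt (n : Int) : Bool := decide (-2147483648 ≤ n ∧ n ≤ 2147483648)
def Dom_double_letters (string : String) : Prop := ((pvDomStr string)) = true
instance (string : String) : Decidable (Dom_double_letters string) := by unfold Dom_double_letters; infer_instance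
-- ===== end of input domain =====

-- B replaces A's previous-character scan by a different algorithm: over the set of
-- distinct characters, substring-search for the doubled string c+c (objective: alternative).

-- ===== PORT A =====
-- A's sentinel previous = "" never equals a character, so it is ported as Option Char starting at none
def doubleLettersLoop (chars : List Char) (previous : Option Char) : Bool :=
  match chars with
  | [] => false
  | x :: rest => if previous == some x then true else doubleLettersLoop rest (some x)

def double_letters (string : String) : Bool :=
  doubleLettersLoop string.toList none

-- ===== PORT B =====
-- set(string) = PySem.Set.ofList; 'c + c in string' = PySem.Chars.isIn [c, c] on the char list (exact)
def double_letters_alt (string : String) : Bool :=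
  (PySem.Set.ofList string.toList).any (fun c => PySem.Chars.isIn [c, c] string.toList)

-- ===== PRECONDITION & SPEC =====
def Spec_double_letters (string : String) (out : Bool) : Prop := out = double_letters_alt string
instance (string : String) (out : Bool) : Decidable (Spec_double_letters string out) := by unfold Spec_double_letters; infer_instance

-- ===== CLAIM (what is proved, stated in full; the proofs are below) =====
def Claim_equal_double_letters : Prop := ∀ (string : String), Dom_double_letters string → Spec_double_letters string (double_letters string)

-- ===== LEMMAS AND PROOFS =====
-- A's loop, resumed after the first character, finds an adjacent duplicate iff some
-- doubled pair [c, c] is an infix of the remaining string (previous character included).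
lemma doubleLettersLoop_iff_infix (as : List Char) (a : Char) :
    doubleLettersLoop as (some a) = true ↔ ∃ c, [c, c] <:+: a :: as := by
  induction as generalizing a with
  | nil =>
    simp only [doubleLettersLoop, Bool.false_eq_true, false_iff]
    rintro ⟨c, h⟩
    have := h.sublist.length_le
    simp at this
  | cons b bs ih =>
    by_cases hab : a = b
    · subst hab
      simp only [doubleLettersLoop, beq_self_eq_true, if_pos, true_iff]
      exact ⟨a, (List.prefix_iff_eq_take.2 rfl).isInfix⟩
    · have h1 : (some a == some b) = false := by simp [hab]
      simp only [doubleLettersLoop, h1, Bool.false_eq_true, if_false, ih]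
      constructor
      · rintro ⟨c, h⟩; exact ⟨c, List.infix_cons h⟩
      · rintro ⟨c, h⟩
        rcases List.infix_cons_iff.1 h with h' | h'
        · rcases h' with ⟨t, ht⟩
          injection ht with h2 h3
          injection h3 with h4 _
          exact absurd (h2.symm.trans h4) hab
        · exact ⟨c, h'⟩

-- membership of the doubled pair implies membership of c (used to discharge the set filter)
lemma mem_of_pair_infix (c : Char) (l : List Char) (h : [c, c] <:+: l) : c ∈ l :=
  h.sublist.mem (by simp)

-- ===== VERDICT (by name: the statement is the Claim_ definition above) =====
theorem double_letters_spec : Claim_equal_double_letters := by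
  intro s _
  unfold Spec_double_letters double_letters double_letters_alt
  cases hs : s.toList with
  | nil => simp [doubleLettersLoop, PySem.Set.ofList]
  | cons a as =>
    rw [Bool.eq_iff_iff, List.any_eq_true]
    simp only [PySem.Chars.isIn_iff_infix]
    rw [doubleLettersLoop]
    have h1 : ((none : Option Char) == some a) = false := rfl
    rw [h1]
    simp only [Bool.false_eq_true, if_false]
    rw [doubleLettersLoop_iff_infix]
    constructor
    · rintro ⟨c, h⟩
      exact ⟨c, by rw [PySem.Set.mem_ofList]; exact mem_of_pair_infix c _ h, h⟩
    · rintro ⟨c, _, h⟩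
      exact ⟨c, h⟩
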